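-- pv_equiv track=rewrite | github.com/Vedqiibyol/MarkRight | previous/_main-2022-10-31.py | ParseHead
-- ===== SOURCE A (Python) =====
-- def StrMatch(txt, pos, target):
-- 	return txt[pos:pos+len(target)] == target
--
-- def ParseHead(text, pos):
-- 	valid = False
-- 	inc   = 0
-- 	reth  = ''
--
-- 	data = text[pos:pos+256].split(' ', 1)[0]
--
-- 	if StrMatch(text, pos, '#.'):
-- 		reth = 'hsmall'
--
-- 		inc = 2
-- 	else:
-- 		for i in data:
-- 			if i != '#' and inc < 6: break
-- 			inc += 1
--
-- 		if inc:
-- 			reth = f"h{str(inc)}"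
--
-- 	if inc == len(data):
-- 		valid = True
--
-- 	return (valid, inc+1, reth)
-- ===== SOURCE B (Python) =====
-- def ParseHead(text, pos):
--     data = text[pos:pos+256].split(' ', 1)[0]
--     if text[pos:pos+2] == '#.':
--         return (len(data) == 2, 3, 'hsmall')
--     level = min(len(data) - len(data.lstrip('#')), 6)
--     return (level == len(data), level + 1, f"h{level}" if level else '')
-- ===== Notes on version B (the rewrite author's own statement) =====
-- stated objective: simpler
-- what changed: Replaces A's stateful char loop whose break condition entangles the running counter with a 6-threshold by the lstrip idiom (leading-'#' run length) capped at 6 with min, the standard Markdown rule; this intentionally drops A's quirk of counting to the end of the word once six hashes are seen.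
-- intended difference: On inputs whose first word (when the '#.' override does not fire) is longer than 6 characters and starts with six '#', A returns valid=True with tag h{len(word)} (e.g. (True, 8, 'h7') for '######a'); B caps the level at 6 and returns (False, 7, 'h6'), the intended behaviour since Markdown/HTML headings beyond h6 do not exist. — e.g. on ParseHead("######a", 0): A returns (true, 8, "h7"), B returns (false, 7, "h6")
import Mathlib
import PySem

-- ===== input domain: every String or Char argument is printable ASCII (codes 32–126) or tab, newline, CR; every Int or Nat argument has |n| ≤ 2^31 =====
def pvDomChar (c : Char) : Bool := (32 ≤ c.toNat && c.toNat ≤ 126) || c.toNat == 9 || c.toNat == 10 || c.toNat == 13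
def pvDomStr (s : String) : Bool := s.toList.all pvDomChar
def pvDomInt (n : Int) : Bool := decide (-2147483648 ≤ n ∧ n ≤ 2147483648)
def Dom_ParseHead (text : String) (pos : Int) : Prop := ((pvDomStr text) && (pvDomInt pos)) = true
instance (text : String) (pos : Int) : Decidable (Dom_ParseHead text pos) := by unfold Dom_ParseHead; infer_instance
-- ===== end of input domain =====

-- B replaces A's stateful counting loop by the lstrip idiom with the heading level capped at 6,
-- the Markdown rule; on words with ≥ 6 leading '#' and extra characters A's counter runs to the
-- end of the word (levels like 'h9'), B caps at 6 — stated as the intended difference D_ below.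

-- ===== PORT A =====
-- StrMatch(txt, pos, target): txt[pos:pos+len(target)] == target
def StrMatchA (txt : List Char) (pos : Int) (target : List Char) : Bool :=
  PySem.List.slice txt (some pos) (some (pos + (target.length : Int))) == target

-- for i in data: if i != '#' and inc < 6: break; inc += 1
def parseHeadLoopA : List Char → Int → Int
  | [], inc => inc
  | c :: rest, inc => if c ≠ '#' ∧ inc < 6 then inc else parseHeadLoopA rest (inc + 1)

def ParseHead (text : String) (pos : Int) : Bool × Int × String :=
  let tl := text.toList
  -- data = text[pos:pos+256].split(' ', 1)[0]  ([0] of a split is its head: split never returns [])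
  let data := (PySem.Chars.splitOnMax (PySem.List.slice tl (some pos) (some (pos + 256))) [' '] 1).headD []
  let ir : Int × String :=
    if StrMatchA tl pos ['#', '.'] then ((2 : Int), "hsmall")
    else
      let inc := parseHeadLoopA data 0
      (inc, if inc ≠ 0 then "h" ++ PySem.Int.toStr inc else "")
  let valid := decide (ir.1 = (data.length : Int))
  (valid, ir.1 + 1, ir.2)

-- ===== PORT B =====
def ParseHead_alt (text : String) (pos : Int) : Bool × Int × String :=
  let tl := text.toList
  let data := (PySem.Chars.splitOnMax (PySem.List.slice tl (some pos) (some (pos + 256))) [' '] 1).headD []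
  if PySem.List.slice tl (some pos) (some (pos + 2)) == ['#', '.'] then
    (decide ((data.length : Int) = 2), 3, "hsmall")
  else
    -- level = min(len(data) - len(data.lstrip('#')), 6); lstrip('#') ported by hand as
    -- dropWhile (== '#'), exact for a single strip character
    let level : Int := min ((data.length : Int) - ((data.dropWhile (fun c => c == '#')).length : Int)) 6
    (decide (level = (data.length : Int)), level + 1, if level ≠ 0 then "h" ++ PySem.Int.toStr level else "")

-- ===== PRECONDITION & SPEC =====
-- On inputs whose first word (of text[pos:pos+256], when the '#.' override does not fire) is longer
-- than 6 characters and starts with six '#', A returns valid=True with a heading tag 'h{len(word)}'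
-- (e.g. (True, 8, 'h7') for '######a'); B returns level 6 capped and valid=False, the intended
-- Markdown behaviour since headings beyond h6 do not exist.
def D_ParseHead (text : String) (pos : Int) : Prop :=
  let w := (PySem.Str.slice text (some pos) (some (pos + 256))).toList.takeWhile (fun c => !(c == ' '))
  6 < w.length ∧ w.take 6 = List.replicate 6 '#'
instance (text : String) (pos : Int) : Decidable (D_ParseHead text pos) := by unfold D_ParseHead; infer_instance

def Spec_ParseHead (text : String) (pos : Int) (out : Bool × Int × String) : Prop := ¬ D_ParseHead text pos → out = ParseHead_alt text pos
instance (text : String) (pos : Int) (out : Bool × Int × String) : Decidable (Spec_ParseHead text pos out) := by unfold Spec_ParseHead; infer_instance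

def pvDiffWitness_ParseHead : String × Int := ("######a", 0)
def pvDiffWitnessOut_ParseHead : (Bool × Int × String) × (Bool × Int × String) :=
  ((true, 8, "h7"), (false, 7, "h6"))

-- ===== CLAIM (what is proved, stated in full; the proofs are below) =====
def Claim_unchanged_ParseHead : Prop := ∀ (text : String) (pos : Int), Dom_ParseHead text pos → Spec_ParseHead text pos (ParseHead text pos)
def Claim_changed_ParseHead : Prop := Dom_ParseHead (pvDiffWitness_ParseHead.1) (pvDiffWitness_ParseHead.2) ∧ D_ParseHead (pvDiffWitness_ParseHead.1) (pvDiffWitness_ParseHead.2) ∧ ParseHead (pvDiffWitness_ParseHead.1) (pvDiffWitness_ParseHead.2) = pvDiffWitnessOut_ParseHead.1 ∧ ParseHead_alt (pvDiffWitness_ParseHead.1) (pvDiffWitness_ParseHead.2) = pvDiffWitnessOut_ParseHead.2 ∧ pvDiffWitnessOut_ParseHead.1 ≠ pvDiffWitnessOut_ParseHead.2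
def Claim_exact_ParseHead : Prop := ∀ (text : String) (pos : Int), Dom_ParseHead text pos → D_ParseHead text pos → ParseHead text pos ≠ ParseHead_alt text pos

-- ===== LEMMAS AND PROOFS =====

lemma D_ParseHead_iff (text : String) (pos : Int) :
    D_ParseHead text pos ↔
      (6 < ((PySem.List.slice text.toList (some pos) (some (pos + 256))).takeWhile
              (fun c => !(c == ' '))).length ∧
        ((PySem.List.slice text.toList (some pos) (some (pos + 256))).takeWhile
              (fun c => !(c == ' '))).take 6 = List.replicate 6 '#') := by
  unfold D_ParseHead
  rw [PySem.Str.toList_slice]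
  simp

-- a word of more than six characters starting with six '#' rules out the '#.' override
lemma no_override (l : List Char) (pos : Int)
    (hlen : 6 < ((PySem.List.slice l (some pos) (some (pos + 256))).takeWhile
        (fun c => !(c == ' '))).length)
    (htake : ((PySem.List.slice l (some pos) (some (pos + 256))).takeWhile
        (fun c => !(c == ' '))).take 6 = List.replicate 6 '#') :
    ¬ (PySem.List.slice l (some pos) (some (pos + 2)) = ['#', '.']) := by
  intro h2
  set w := (PySem.List.slice l (some pos) (some (pos + 256))).takeWhile
      (fun c => !(c == ' ')) with hw
  have hw1 : w[1]? = some '#' := by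
    have h : (w.take 6)[1]? = w[1]? := by
      simp
    rw [htake] at h
    simpa using h.symm
  have hpw : w <+: l.drop (PySem.List.clampIdx l.length pos) := by
    refine (List.takeWhile_prefix _).trans ?_
    simpa [PySem.List.slice] using List.take_prefix _ (l.drop (PySem.List.clampIdx l.length pos))
  have hd1 : (l.drop (PySem.List.clampIdx l.length pos))[1]? = some '#' := by
    obtain ⟨r, hr⟩ := hpw
    rw [← hr, List.getElem?_append_left (by omega : 1 < w.length), hw1]
  have hp2 : ['#', '.'] <+: l.drop (PySem.List.clampIdx l.length pos) := by
    rw [← h2]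
    simpa [PySem.List.slice] using List.take_prefix _ (l.drop (PySem.List.clampIdx l.length pos))
  obtain ⟨r2, hr2⟩ := hp2
  have hd1' : (l.drop (PySem.List.clampIdx l.length pos))[1]? = some '.' := by
    rw [← hr2]; rfl
  rw [hd1] at hd1'
  exact absurd (Option.some.inj hd1') (by decide)

-- once inc ≥ 6 the loop never breaks: it adds the remaining length
lemma parseHeadLoopA_ge (d : List Char) : ∀ (k : Int), 6 ≤ k → parseHeadLoopA d k = k + d.length := by
  induction d with
  | nil => intro k _; simp [parseHeadLoopA]
  | cons c rest ih =>
    intro k hk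
    have : ¬ (c ≠ '#' ∧ k < 6) := by rintro ⟨_, h⟩; omega
    simp only [parseHeadLoopA, if_neg this, ih (k + 1) (by omega), List.length_cons]
    push_cast; ring

-- characterisation of A's loop from a start value k ≤ 6
lemma parseHeadLoopA_spec (d : List Char) : ∀ (k : Nat), k ≤ 6 →
    parseHeadLoopA d (k : Int) =
      if (d.takeWhile (fun c => c == '#')).length + k < 6
      then ((k + (d.takeWhile (fun c => c == '#')).length : Nat) : Int)
      else (k : Int) + d.length := by
  induction d with
  | nil => intro k hk; simp [parseHeadLoopA]
  | cons c rest ih =>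
    intro k hk
    by_cases hc : c = '#'
    · subst hc
      have hne : ¬ (('#' : Char) ≠ '#' ∧ (k : Int) < 6) := by rintro ⟨h, _⟩; exact h rfl
      simp only [parseHeadLoopA, if_neg hne, List.takeWhile_cons, beq_self_eq_true, if_pos,
        List.length_cons]
      by_cases hk6 : k = 6
      · subst hk6
        rw [show ((6 : Nat) : Int) + 1 = (7 : Int) by norm_num,
            parseHeadLoopA_ge rest 7 (by norm_num)]
        split_ifs with h1
        · omega
        · push_cast; ring
      · rw [show ((k : Int) + 1) = ((k + 1 : Nat) : Int) by push_cast; ring, ih (k + 1) (by omega)]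
        split_ifs with h1 h2 h2 <;> push_cast <;> omega
    · have hcf : (c == '#') = false := by simp [hc]
      have htw : (c :: rest).takeWhile (fun c => c == '#') = [] := by simp [hcf]
      by_cases hk6 : k = 6
      · subst hk6
        have hne : ¬ (c ≠ '#' ∧ ((6 : Nat) : Int) < 6) := by rintro ⟨_, h⟩; omega
        simp only [parseHeadLoopA, if_neg hne]
        rw [show ((6 : Nat) : Int) + 1 = (7 : Int) by norm_num,
            parseHeadLoopA_ge rest 7 (by norm_num)]
        simp [htw]; ring
      · have hbr : (c ≠ '#' ∧ (k : Int) < 6) := ⟨hc, by omega⟩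
        simp only [parseHeadLoopA, if_pos hbr, htw]
        simp; omega

-- with maxsplit already exhausted the split-off head of the accumulator is the final head
lemma splitOnMax_go_zero_head (fuel : Nat) (l : List Char) (c0 : List Char) :
    (PySem.Chars.splitOnMax.go [' '] fuel 0 l [] [c0]).headD [] = c0 := by
  cases fuel with
  | zero => simp [PySem.Chars.splitOnMax.go]
  | succ f => cases l <;> simp [PySem.Chars.splitOnMax.go]

-- the first piece of split(' ', 1) is the prefix before the first space
lemma splitOnMax_go_one_head : ∀ (fuel : Nat) (l cur : List Char), l.length < fuel →
    (PySem.Chars.splitOnMax.go [' '] fuel 1 l cur []).headD [] =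
      cur.reverse ++ l.takeWhile (fun c => !(c == ' ')) := by
  intro fuel
  induction fuel with
  | zero => intro l cur h; omega
  | succ f ih =>
    intro l cur h
    cases l with
    | nil => simp [PySem.Chars.splitOnMax.go]
    | cons c rest =>
      by_cases hc : c = ' '
      · subst hc
        have hz := splitOnMax_go_zero_head f rest cur.reverse
        simp only [PySem.Chars.splitOnMax.go, List.isPrefixOf, beq_self_eq_true, Bool.and_eq_true,
          if_neg (by norm_num : ¬ (1 : Nat) = 0)]
        rw [show (1 : Nat) - 1 = 0 from rfl]
        rw [List.headD_eq_head?_getD] at hz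
        simp [hz]
      · have hpre : ([' '].isPrefixOf (c :: rest)) = false := by
          simp only [List.isPrefixOf, Bool.and_true, beq_eq_false_iff_ne]
          exact fun h' => hc h'.symm
        simp only [PySem.Chars.splitOnMax.go, if_neg (by norm_num : ¬ (1 : Nat) = 0)]
        rw [hpre]
        simp only [Bool.false_eq_true, if_false]
        rw [ih rest (c :: cur) (by simp at h ⊢; omega)]
        have : (c == ' ') = false := by simp [hc]
        simp [this]

lemma splitOnMax_head (xs : List Char) :
    (PySem.Chars.splitOnMax xs [' '] 1).headD [] = xs.takeWhile (fun c => !(c == ' ')) := by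
  unfold PySem.Chars.splitOnMax
  rw [if_neg (by norm_num)]
  rw [show ((1 : Int).toNat) = 1 from rfl]
  simpa using splitOnMax_go_one_head (xs.length + 1) xs [] (by omega)

-- a list whose first n characters are all '#' has a '#'-run of length at least n …
lemma takeWhile_ge_of_take (w : List Char) : ∀ (n : Nat), w.take n = List.replicate n '#' →
    n ≤ (w.takeWhile (fun c => c == '#')).length := by
  induction w with
  | nil => intro n h; have := congrArg List.length h; simp at this; omega
  | cons c rest ih =>
    intro n h
    cases n with
    | zero => omega
    | succ m =>
      simp only [List.take_succ_cons, List.replicate_succ, List.cons.injEq] at h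
      obtain ⟨rfl, hrest⟩ := h
      simp only [List.takeWhile_cons, beq_self_eq_true, if_pos, List.length_cons]
      have := ih m hrest
      omega

-- … and conversely
lemma take_of_takeWhile_ge (w : List Char) : ∀ (n : Nat),
    n ≤ (w.takeWhile (fun c => c == '#')).length → w.take n = List.replicate n '#' := by
  induction w with
  | nil => intro n h; simp at h; subst h; simp
  | cons c rest ih =>
    intro n h
    cases n with
    | zero => simp
    | succ m =>
      by_cases hc : (c == '#') = true
      · have hc' : c = '#' := by simpa using hc
        subst hc'
        simp only [List.takeWhile_cons, beq_self_eq_true, if_pos, List.length_cons] at h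
        simp [List.replicate_succ, ih m (by omega)]
      · simp [hc] at h

-- the run length plus the stripped remainder is the whole word
lemma takeWhile_add_dropWhile_length (w : List Char) :
    (w.takeWhile (fun c => c == '#')).length + (w.dropWhile (fun c => c == '#')).length
      = w.length := by
  have h := congrArg List.length
    (List.takeWhile_append_dropWhile (p := fun c => c == '#') (l := w))
  rw [List.length_append] at h
  exact h

-- ===== VERDICT (by name: the statement is the Claim_ definition above) =====
theorem ParseHead_spec : Claim_unchanged_ParseHead := by
  intro text pos _ hD
  unfold ParseHead ParseHead_alt
  simp only [splitOnMax_head]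
  set w := (PySem.List.slice text.toList (some pos) (some (pos + 256))).takeWhile
      (fun c => !(c == ' ')) with hw
  have hmatch : StrMatchA text.toList pos ['#', '.'] =
      (PySem.List.slice text.toList (some pos) (some (pos + 2)) == ['#', '.']) := by
    simp [StrMatchA]
  by_cases hm : (PySem.List.slice text.toList (some pos) (some (pos + 2)) == ['#', '.']) = true
  · rw [hmatch, hm]
    simp only [if_true]
    refine Prod.ext ?_ (Prod.ext rfl rfl)
    simp [eq_comm]
  · rw [hmatch]
    simp only [hm, Bool.false_eq_true, if_false]
    rw [D_ParseHead_iff] at hD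
    have hD' : ¬ (6 < w.length ∧ w.take 6 = List.replicate 6 '#') := hD
    set L := (w.takeWhile (fun c => c == '#')).length with hL
    have hloop := parseHeadLoopA_spec w 0 (by norm_num)
    rw [show ((0 : Nat) : Int) = (0 : Int) by norm_num] at hloop
    simp only [zero_add, add_zero] at hloop
    have hlen : L + (w.dropWhile (fun c => c == '#')).length = w.length :=
      takeWhile_add_dropWhile_length w
    have hlevel : ((w.length : Int) - ((w.dropWhile (fun c => c == '#')).length : Int))
        = (L : Int) := by omega
    rw [hloop, hlevel]
    by_cases h6 : L < 6
    · rw [if_pos (by omega), min_eq_left (by omega : (L : Int) ≤ 6)]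
    · have htake : w.take 6 = List.replicate 6 '#' := take_of_takeWhile_ge w 6 (by omega)
      have hwlen : w.length ≤ 6 := by
        by_contra hgt
        exact hD' ⟨by omega, htake⟩
      have hL6 : L = 6 := by omega
      have hw6 : w.length = 6 := by omega
      rw [if_neg (by omega), hL6, hw6]
      norm_num

theorem ParseHead_changed : Claim_changed_ParseHead := by unfold Claim_changed_ParseHead; decide

theorem ParseHead_tight : Claim_exact_ParseHead := by
  intro text pos _ hD
  rw [D_ParseHead_iff] at hD
  obtain ⟨hlen, htake⟩ := hD
  have hm' := no_override text.toList pos hlen htake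
  unfold ParseHead ParseHead_alt
  simp only [splitOnMax_head]
  set w := (PySem.List.slice text.toList (some pos) (some (pos + 256))).takeWhile
      (fun c => !(c == ' ')) with hw
  have hm : (PySem.List.slice text.toList (some pos) (some (pos + 2)) == ['#', '.']) = false := by
    simpa using hm'
  have hmatch : StrMatchA text.toList pos ['#', '.'] = false := by
    simpa [StrMatchA] using hm
  set L := (w.takeWhile (fun c => c == '#')).length with hL
  have hL6 : 6 ≤ L := takeWhile_ge_of_take w 6 htake
  have hloop := parseHeadLoopA_spec w 0 (by norm_num)
  rw [show ((0 : Nat) : Int) = (0 : Int) by norm_num] at hloop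
  simp only [zero_add, add_zero] at hloop
  rw [if_neg (by omega)] at hloop
  have hlen' : L + (w.dropWhile (fun c => c == '#')).length = w.length :=
    takeWhile_add_dropWhile_length w
  have hlevel : ((w.length : Int) - ((w.dropWhile (fun c => c == '#')).length : Int))
      = (L : Int) := by omega
  intro heq
  have h2 := congrArg (fun t : Bool × Int × String => t.2.1) heq
  simp only [hmatch, hm, Bool.false_eq_true, if_false, hloop, hlevel] at h2
  have hmin : min (L : Int) 6 = 6 := by omega
  rw [hmin] at h2
  omega
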